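-- pv_equiv track=rewrite | github.com/JustAHobbyDev/cortex-coach | cortex_coach/agent_context_loader.py | _bundle_success
-- ===== SOURCE A (Python) =====
-- from typing import Any
--
-- def _bundle_success(report: dict[str, Any]) -> bool:
--     files = report.get("files", [])
--     if not files:
--         return False
--     control = [f for f in files if str(f.get("selected_by", "")).startswith("control_plane")]
--     task = [f for f in files if str(f.get("selected_by", "")).startswith("task:")]
--     if not control:
--         return False
--     if not task:
--         return False
--     return True
-- ===== SOURCE B (Python) =====
-- from typing import Any
--
-- def _bundle_success(report: dict[str, Any]) -> bool:
--     files = report.get("files", [])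
--     if not files:
--         return False
--     has_control = False
--     has_task = False
--     for f in files:
--         sel = str(f.get("selected_by", ""))
--         if sel.startswith("control_plane"):
--             has_control = True
--         if sel.startswith("task:"):
--             has_task = True
--         if has_control and has_task:
--             return True
--     return has_control and has_task
-- ===== Notes on version B (the rewrite author's own statement) =====
-- stated objective: alternative
-- what changed: Replaces the two filtering list comprehensions plus emptiness tests with a single early-exit loop that maintains two boolean flags.
import Mathlib
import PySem

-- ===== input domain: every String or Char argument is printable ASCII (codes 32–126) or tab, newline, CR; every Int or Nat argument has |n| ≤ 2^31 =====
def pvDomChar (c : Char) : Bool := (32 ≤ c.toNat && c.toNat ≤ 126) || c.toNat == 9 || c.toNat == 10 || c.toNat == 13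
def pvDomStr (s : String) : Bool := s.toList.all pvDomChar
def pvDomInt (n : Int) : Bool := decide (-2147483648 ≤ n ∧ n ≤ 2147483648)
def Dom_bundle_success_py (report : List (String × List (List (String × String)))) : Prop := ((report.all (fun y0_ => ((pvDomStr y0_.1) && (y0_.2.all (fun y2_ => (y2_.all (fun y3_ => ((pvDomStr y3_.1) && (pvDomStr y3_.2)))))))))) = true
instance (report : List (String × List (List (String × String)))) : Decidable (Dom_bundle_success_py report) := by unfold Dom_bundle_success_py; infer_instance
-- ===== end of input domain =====

-- B replaces A's two filtering comprehensions by one early-exit flag loop; same return value everywhere.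

-- ===== PORT A =====
-- A: filter twice, then test both filtered lists for emptiness.
def bundle_success_py (report : List (String × List (List (String × String)))) : Bool :=
  let files := PySem.Dict.getD (PySem.Dict.mk report) "files" []
  if files.isEmpty then false
  else
    let control := files.filter (fun f => PySem.Str.startswith (PySem.Dict.getD (PySem.Dict.mk f) "selected_by" "") "control_plane")
    let task := files.filter (fun f => PySem.Str.startswith (PySem.Dict.getD (PySem.Dict.mk f) "selected_by" "") "task:")
    if control.isEmpty then false
    else if task.isEmpty then false
    else true

-- ===== PORT B =====
-- B's loop: two accumulated flags, returning early once both are set.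
def bundleLoop : List (List (String × String)) → Bool → Bool → Bool
  | [], hc, ht => hc && ht
  | f :: rest, hc, ht =>
    let sel := PySem.Dict.getD (PySem.Dict.mk f) "selected_by" ""
    let hc' := if PySem.Str.startswith sel "control_plane" then true else hc
    let ht' := if PySem.Str.startswith sel "task:" then true else ht
    if hc' && ht' then true else bundleLoop rest hc' ht'

def bundle_success_py_alt (report : List (String × List (List (String × String)))) : Bool :=
  let files := PySem.Dict.getD (PySem.Dict.mk report) "files" []
  if files.isEmpty then false
  else bundleLoop files false false

-- ===== PRECONDITION & SPEC =====
def Spec_bundle_success_py (report : List (String × List (List (String × String)))) (out : Bool) : Prop := out = bundle_success_py_alt report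
instance (report : List (String × List (List (String × String)))) (out : Bool) : Decidable (Spec_bundle_success_py report out) := by unfold Spec_bundle_success_py; infer_instance

-- ===== CLAIM (what is proved, stated in full; the proofs are below) =====
def Claim_equal_bundle_success_py : Prop := ∀ (report : List (String × List (List (String × String)))), Dom_bundle_success_py report → Spec_bundle_success_py report (bundle_success_py report)

-- ===== LEMMAS AND PROOFS =====

-- the flag loop computes: (hc or some file is control) and (ht or some file is task)
theorem bundleLoop_eq (xs : List (List (String × String))) (hc ht : Bool) :
    bundleLoop xs hc ht =
      ((hc || xs.any (fun f => PySem.Str.startswith (PySem.Dict.getD (PySem.Dict.mk f) "selected_by" "") "control_plane")) &&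
       (ht || xs.any (fun f => PySem.Str.startswith (PySem.Dict.getD (PySem.Dict.mk f) "selected_by" "") "task:"))) := by
  induction xs generalizing hc ht with
  | nil => simp [bundleLoop]
  | cons f rest ih =>
    simp only [bundleLoop, List.any_cons]
    rw [ih]
    cases hC : PySem.Str.startswith (PySem.Dict.getD (PySem.Dict.mk f) "selected_by" "") "control_plane" <;>
      cases hT : PySem.Str.startswith (PySem.Dict.getD (PySem.Dict.mk f) "selected_by" "") "task:" <;>
      cases hc <;> cases ht <;> simp

-- ===== VERDICT (by name: the statement is the Claim_ definition above) =====
theorem bundle_success_py_spec : Claim_equal_bundle_success_py := by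
  intro report _
  unfold Spec_bundle_success_py bundle_success_py bundle_success_py_alt
  set files := PySem.Dict.getD (PySem.Dict.mk report) "files" [] with hf
  by_cases h : files.isEmpty
  · simp [h]
  · simp only [h, if_false, Bool.false_eq_true]
    rw [bundleLoop_eq]
    rcases hctl : files.any (fun f => PySem.Str.startswith (PySem.Dict.getD (PySem.Dict.mk f) "selected_by" "") "control_plane") <;>
      rcases htsk : files.any (fun f => PySem.Str.startswith (PySem.Dict.getD (PySem.Dict.mk f) "selected_by" "") "task:") <;>
      simp_all [List.isEmpty_iff, List.filter_eq_nil_iff, List.any_eq_true]
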